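-- pv_equiv track=rewrite | github.com/paliwaldeepak/data-science-fsds | ans 1.py | find_highest_frequency_word_length
-- ===== SOURCE A (Python) =====
-- def find_highest_frequency_word_length(s):
--     # Remove non-alphanumeric characters and convert to lowercase
--     s = ''.join(c for c in s if c.isalnum() or c.isspace()).lower()
--
--     # Split the string into words
--     words = s.split()
--
--     # Count the frequency of each word
--     freq = {}
--     for word in words:
--         if word in freq:
--             freq[word] += 1
--         else:
--             freq[word] = 1
--
--     # Find the highest frequency
--     max_freq = 0
--     for word in freq:
--         if freq[word] > max_freq:
--             max_freq = freq[word]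
--
--     # Find the length of the highest-frequency word
--     max_freq_word_length = 0
--     for word in freq:
--         if freq[word] == max_freq and len(word) > max_freq_word_length:
--             max_freq_word_length = len(word)
--
--     return max_freq_word_length
-- ===== SOURCE B (Python) =====
-- def find_highest_frequency_word_length(s):
--     # sort the words so equal words are adjacent, then scan runs once,
--     # keeping the lexicographically largest (run_length, word_length) pair
--     s = ''.join(c for c in s if c.isalnum() or c.isspace()).lower()
--     best = (0, 0)
--     prev = None
--     run = 0
--     for w in sorted(s.split()):
--         if w == prev:
--             run += 1
--         else:
--             prev, run = w, 1
--         cand = (run, len(w))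
--         if cand > best:
--             best = cand
--     return best[1]
-- ===== Notes on version B (the rewrite author's own statement) =====
-- stated objective: alternative
-- what changed: Replaces A's hash-map counting plus two scans over the dict with sort-then-scan: the words are sorted so equal words become adjacent, and one run-length scan over the sorted list keeps the lexicographically largest (run_length, word_length) pair, whose second component is the answer.
import Mathlib
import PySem

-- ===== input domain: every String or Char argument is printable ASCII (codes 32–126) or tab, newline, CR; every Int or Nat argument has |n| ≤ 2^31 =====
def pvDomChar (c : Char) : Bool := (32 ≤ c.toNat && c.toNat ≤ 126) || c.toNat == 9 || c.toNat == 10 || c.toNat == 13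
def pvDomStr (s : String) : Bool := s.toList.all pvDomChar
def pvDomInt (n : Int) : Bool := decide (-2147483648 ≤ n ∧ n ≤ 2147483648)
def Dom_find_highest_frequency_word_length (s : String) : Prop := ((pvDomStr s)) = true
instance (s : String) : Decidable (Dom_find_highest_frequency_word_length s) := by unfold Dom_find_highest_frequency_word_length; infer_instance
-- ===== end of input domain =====

-- B replaces A's hash-map counting plus two scans over the dict by sort-then-scan: sort the words,
-- then one run-length scan keeps the lexicographically largest (run_length, word_length) pair (objective: alternative).

-- ===== PORT A =====
def find_highest_frequency_word_length (s : String) : Int :=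
  let cs := PySem.Chars.lower (s.toList.filter (fun c => PySem.Chars.isalnum c || PySem.Chars.isspace c))
  let words := PySem.Chars.split₀ cs
  let freq := words.foldl
    (fun (d : PySem.Dict (List Char) Int) w =>
      if d.contains w then d.insert w (d.getD w 0 + 1) else d.insert w 1) PySem.Dict.empty
  let maxFreq := freq.keys.foldl (fun m w => if freq.getD w 0 > m then freq.getD w 0 else m) (0 : Int)
  freq.keys.foldl
    (fun m w => if freq.getD w 0 == maxFreq && (w.length : Int) > m then (w.length : Int) else m) (0 : Int)

-- ===== PORT B =====
def find_highest_frequency_word_length_alt (s : String) : Int :=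
  let cs := PySem.Chars.lower (s.toList.filter (fun c => PySem.Chars.isalnum c || PySem.Chars.isspace c))
  -- sorted(s.split()): Python's lexicographic string order is the Lex order on List Char
  let ws := @PySem.List.sorted (List Char) (List Char) List.instLinearOrder.toLT LinearOrder.toDecidableLT
    (PySem.Chars.split₀ cs) (fun x => x) false
  let st := ws.foldl
    (fun (st : Option (List Char) × Int × (Int × Int)) w =>
      let run : Int := if st.1 == some w then st.2.1 + 1 else 1
      let cand : Int × Int := (run, (w.length : Int))
      (some w, run,
        if st.2.2.1 < cand.1 ∨ (st.2.2.1 = cand.1 ∧ st.2.2.2 < cand.2) then cand else st.2.2))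
    (none, 0, (0, 0))
  st.2.2.2

-- ===== PRECONDITION & SPEC =====
def Spec_find_highest_frequency_word_length (s : String) (out : Int) : Prop := out = find_highest_frequency_word_length_alt s
instance (s : String) (out : Int) : Decidable (Spec_find_highest_frequency_word_length s out) := by unfold Spec_find_highest_frequency_word_length; infer_instance

-- ===== CLAIM (what is proved, stated in full; the proofs are below) =====
def Claim_equal_find_highest_frequency_word_length : Prop := ∀ (s : String), Dom_find_highest_frequency_word_length s → Spec_find_highest_frequency_word_length s (find_highest_frequency_word_length s)

-- ===== LEMMAS AND PROOFS =====

-- the "cand > best" update of B, on (frequency, length) pairs: lexicographic running max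
def pvUpd (b c : Int × Int) : Int × Int :=
  if b.1 < c.1 ∨ (b.1 = c.1 ∧ b.2 < c.2) then c else b

-- B's loop body, named for the proofs (definitionally the lambda in the port)
def pvG (st : Option (List Char) × Int × (Int × Int)) (w : List Char) :
    Option (List Char) × Int × (Int × Int) :=
  let run : Int := if st.1 == some w then st.2.1 + 1 else 1
  let cand : Int × Int := (run, (w.length : Int))
  (some w, run,
    if st.2.2.1 < cand.1 ∨ (st.2.2.1 = cand.1 ∧ st.2.2.2 < cand.2) then cand else st.2.2)

theorem pvUpd_comm (b c d : Int × Int) : pvUpd (pvUpd b c) d = pvUpd (pvUpd b d) c := by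
  unfold pvUpd
  split_ifs <;> try rfl
  all_goals (apply Prod.ext <;> omega)

theorem pvUpd_absorb (b : Int × Int) (k k' ℓ : Int) (h : k ≤ k') :
    pvUpd (pvUpd b (k, ℓ)) (k', ℓ) = pvUpd b (k', ℓ) := by
  unfold pvUpd
  split_ifs <;> try rfl
  all_goals (apply Prod.ext <;> simp_all <;> omega)

-- A's two counting loops build the same dict
theorem pv_freq_eq (words : List (List Char)) :
    words.foldl
      (fun (d : PySem.Dict (List Char) Int) w =>
        if d.contains w then d.insert w (d.getD w 0 + 1) else d.insert w 1) PySem.Dict.empty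
    = words.foldl (fun (d : PySem.Dict (List Char) Int) w => d.insert w (d.getD w 0 + 1)) PySem.Dict.empty := by
  apply PySem.List.foldl_congr_mem
  intro d w _
  by_cases h : d.contains w
  · simp [h]
  · have h0 : d.getD w 0 = 0 := PySem.Dict.getD_of_not_contains d 0 (by simpa using h)
    simp [h, h0]

-- a fold over keys that looks each key up equals the fold over items (nodup keys)
theorem pv_keys_fold {β : Type} (d : PySem.Dict (List Char) Int) (hnd : d.keys.Nodup)
    (F : β → List Char → Int → β) (init : β) :
    d.keys.foldl (fun m w => F m w (d.getD w 0)) init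
      = d.items.foldl (fun m p => F m p.1 p.2) init := by
  conv_rhs => rw [PySem.Dict.items_eq_map_keys d hnd 0]
  rw [List.foldl_map]

def pvRunMax (l : List (List Char × Int)) : Int :=
  l.foldl (fun m p => if p.2 > m then p.2 else m) 0

theorem pv_runMax_eq_max (l : List (List Char × Int)) :
    pvRunMax l = l.foldl (fun m p => max m p.2) 0 := by
  unfold pvRunMax
  apply PySem.List.foldl_congr_mem
  intro m p _
  rcases max_cases m p.2 with ⟨h1, h2⟩ | ⟨h1, h2⟩ <;> simp [h1] <;> omega

theorem pv_le_runMax (l : List (List Char × Int)) :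
    0 ≤ pvRunMax l ∧ ∀ p ∈ l, p.2 ≤ pvRunMax l := by
  rw [pv_runMax_eq_max]
  exact PySem.List.le_foldl_max_int l (fun p => p.2) 0

-- A's two scans over (word, count) pairs are one lexicographic running-max pass
theorem pv_pairfold (l : List (List Char × Int)) :
    l.foldl
      (fun (p : Int × Int) wc =>
        if wc.2 > p.1 then (wc.2, (wc.1.length : Int))
        else if wc.2 == p.1 && (wc.1.length : Int) > p.2 then (p.1, (wc.1.length : Int)) else p)
      ((0 : Int), (0 : Int))
    = (pvRunMax l,
       l.foldl (fun m p => if p.2 == pvRunMax l && (p.1.length : Int) > m then (p.1.length : Int) else m) 0) := by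
  induction l using List.reverseRecOn with
  | nil => simp [pvRunMax]
  | append_singleton l q ih =>
    have hM : pvRunMax (l ++ [q]) = if q.2 > pvRunMax l then q.2 else pvRunMax l := by
      simp [pvRunMax, List.foldl_append]
    rw [List.foldl_append, ih]
    simp only [List.foldl_cons, List.foldl_nil]
    by_cases hq : q.2 > pvRunMax l
    · have hzero :
          l.foldl (fun m p => if p.2 == pvRunMax (l ++ [q]) && (p.1.length : Int) > m then (p.1.length : Int) else m) (0 : Int) = 0 := by
        have hco :
            l.foldl (fun m p => if p.2 == pvRunMax (l ++ [q]) && (p.1.length : Int) > m then (p.1.length : Int) else m) (0 : Int)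
              = l.foldl (fun m _ => m) (0 : Int) := by
          apply PySem.List.foldl_congr_mem
          intro m p hp
          have hle : p.2 ≤ pvRunMax l := (pv_le_runMax l).2 p hp
          have hne : p.2 ≠ pvRunMax (l ++ [q]) := by rw [hM, if_pos hq]; omega
          simp [hne]
        rw [hco, PySem.List.foldl_ignore]
      conv_rhs => rw [List.foldl_append]
      rw [hzero, hM, if_pos hq]
      rcases Nat.eq_zero_or_pos q.1.length with h0 | h0
      · simp [hq, h0]
      · simp [hq]
    · have hM' : pvRunMax (l ++ [q]) = pvRunMax l := by rw [hM, if_neg hq]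
      conv_rhs => rw [List.foldl_append]
      rw [hM']
      simp only [List.foldl_cons, List.foldl_nil]
      simp [hq]
      split <;> rfl

-- A's fused pair fold is the pvUpd fold
theorem pv_fused_eq_upd (l : List (List Char × Int)) (init : Int × Int) :
    l.foldl
      (fun (p : Int × Int) wc =>
        if wc.2 > p.1 then (wc.2, (wc.1.length : Int))
        else if wc.2 == p.1 && (wc.1.length : Int) > p.2 then (p.1, (wc.1.length : Int)) else p)
      init
    = l.foldl (fun p wc => pvUpd p (wc.2, (wc.1.length : Int))) init := by
  apply PySem.List.foldl_congr_mem
  intro p wc _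
  unfold pvUpd
  split_ifs <;> try rfl
  all_goals (apply Prod.ext <;> simp_all <;> omega)

-- ----- B-side: the run-length scan over the sorted word list -----

theorem pv_add_cons (w : List Char) :
    ∀ (rest : List (List Char)) (s : List (List Char)), w ∉ rest →
      List.foldl PySem.Set.add (w :: s) rest = w :: List.foldl PySem.Set.add s rest := by
  intro rest
  induction rest with
  | nil => intro s _; rfl
  | cons x t ih =>
    intro s hw
    have hxw : x ≠ w := fun h => hw (by simp [h])
    have hws : w ∉ t := fun h => hw (by simp [h])
    have hstep : PySem.Set.add (w :: s) x = w :: PySem.Set.add s x := by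
      simp [PySem.Set.add, PySem.Set.contains, hxw]
      split <;> rfl
    simp only [List.foldl_cons, hstep]
    exact ih _ hws

theorem pv_add_rep (w : List Char) : ∀ (n : Nat),
    List.foldl PySem.Set.add [w] (List.replicate n w) = [w] := by
  intro n
  induction n with
  | zero => rfl
  | succ n ih => simpa [List.replicate_succ, PySem.Set.add] using ih

theorem pv_set_cons (w : List Char) (c : Nat) (rest : List (List Char))
    (hc : 0 < c) (hw : w ∉ rest) :
    PySem.Set.ofList (List.replicate c w ++ rest) = w :: PySem.Set.ofList rest := by
  rw [PySem.Set.ofList_eq_foldl, List.foldl_append]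
  obtain ⟨n, rfl⟩ : ∃ n, c = n + 1 := ⟨c - 1, by omega⟩
  rw [List.replicate_succ, List.foldl_cons]
  have h1 : PySem.Set.add [] w = [w] := rfl
  rw [h1, pv_add_rep w n, pv_add_cons w rest [] hw, ← PySem.Set.ofList_eq_foldl]

-- one run of c ≥ 0 further copies of w, starting inside a w-run
theorem pv_run (w : List Char) (c : Nat) :
    ∀ (r : Int) (b : Int × Int),
      List.foldl pvG (some w, r, b) (List.replicate c w)
        = (some w, r + (c : Int),
            if c = 0 then b else pvUpd b (r + (c : Int), (w.length : Int))) := by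
  induction c with
  | zero => intro r b; simp
  | succ n ih =>
    intro r b
    rw [List.replicate_succ, List.foldl_cons]
    have hstep : pvG (some w, r, b) w = (some w, r + 1, pvUpd b (r + 1, (w.length : Int))) := by
      simp [pvG, pvUpd]
    rw [hstep, ih]
    rcases Nat.eq_zero_or_pos n with h0 | hpos
    · subst h0; simp
    · have hne : n ≠ 0 := by omega
      have habs := pvUpd_absorb b (r + 1) (r + 1 + (n : Int)) (w.length : Int) (by omega)
      rw [if_neg hne, if_neg (Nat.succ_ne_zero n), habs]
      have hcast : r + 1 + (n : Int) = r + ((n + 1 : Nat) : Int) := by push_cast; ring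
      rw [hcast]

-- once the scanned word changes, the remembered (prev, run) no longer matter for best
theorem pv_reset (w : List Char) (r : Int) (b : Int × Int) (rest : List (List Char))
    (hw : w ∉ rest) :
    (List.foldl pvG (some w, r, b) rest).2.2 = (List.foldl pvG (none, 0, b) rest).2.2 := by
  cases rest with
  | nil => rfl
  | cons x t =>
    have hxw : x ≠ w := fun h => hw (by simp [h])
    have h1 : pvG (some w, r, b) x = pvG (none, 0, b) x := by
      simp [pvG, Ne.symm hxw]
    simp only [List.foldl_cons, h1]

-- split a nondecreasing list into its first run and the rest
theorem pv_split (l : List (List Char)) (hne : l ≠ []) (hs : l.Pairwise (· ≤ ·)) :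
    ∃ (w : List Char) (c : Nat) (rest : List (List Char)),
      l = List.replicate c w ++ rest ∧ 0 < c ∧ w ∉ rest ∧ rest.Pairwise (· ≤ ·) := by
  obtain ⟨w, t, rfl⟩ : ∃ w t, l = w :: t := by
    cases l with
    | nil => exact absurd rfl hne
    | cons a b => exact ⟨a, b, rfl⟩
  refine ⟨w, ((w :: t).takeWhile (· == w)).length, (w :: t).dropWhile (· == w), ?_, ?_, ?_, ?_⟩
  · conv_lhs => rw [← List.takeWhile_append_dropWhile (p := (· == w)) (l := w :: t)]
    congr 1
    rw [List.eq_replicate_iff]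
    exact ⟨rfl, fun b hb => by simpa using List.mem_takeWhile_imp hb⟩
  · simp
  · intro hwmem
    have hrne : (w :: t).dropWhile (· == w) ≠ [] := List.ne_nil_of_mem hwmem
    set rest := (w :: t).dropWhile (· == w) with hrest
    obtain ⟨h', t', hcons⟩ : ∃ h' t', rest = h' :: t' := by
      cases hr : rest with
      | nil => exact absurd hr hrne
      | cons a b => exact ⟨a, b, rfl⟩
    have hh' : (h' == w) = false := by
      have := List.head_dropWhile_not (fun x => x == w) (l := w :: t) (by rw [← hrest]; exact hrne)
      simpa [← hrest, hcons] using this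
    have hh'ne : h' ≠ w := by simpa using hh'
    have hrsub : rest.Sublist (w :: t) := by rw [hrest]; exact List.dropWhile_sublist _
    have hrp : rest.Pairwise (· ≤ ·) := hs.sublist hrsub
    have hh'mem : h' ∈ (w :: t) := hrsub.subset (by simp [hcons])
    have hwle : w ≤ h' := by
      rcases List.mem_cons.mp hh'mem with h | h
      · exact absurd h hh'ne
      · exact (List.pairwise_cons.mp hs).1 h' h
    have hle : h' ≤ w := by
      rw [hcons] at hwmem hrp
      rcases List.mem_cons.mp hwmem with h | h
      · exact absurd h.symm hh'ne
      · exact (List.pairwise_cons.mp hrp).1 w h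
    exact hh'ne (le_antisymm hle hwle)
  · exact hs.sublist (List.dropWhile_sublist _)

-- the scan over a nondecreasing list computes the pvUpd fold over its distinct (count, length) pairs
theorem pv_scan (n : Nat) :
    ∀ (l : List (List Char)), l.length ≤ n → l.Pairwise (· ≤ ·) → ∀ (b : Int × Int),
      (List.foldl pvG (none, 0, b) l).2.2
        = List.foldl pvUpd b
            ((PySem.Set.ofList l).map (fun w => ((l.count w : Int), (w.length : Int)))) := by
  induction n with
  | zero =>
    intro l hl _ b
    have : l = [] := List.eq_nil_of_length_eq_zero (by omega)
    subst this; rfl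
  | succ n ih =>
    intro l hl hs b
    rcases eq_or_ne l [] with rfl | hne
    · rfl
    · obtain ⟨w, c, rest, hdec, hc, hwr, hrs⟩ := pv_split l hne hs
      subst hdec
      have hlenl : (List.replicate c w ++ rest).length = c + rest.length := by simp
      have hrlen : rest.length ≤ n := by
        rw [hlenl] at hl; omega
      -- LHS
      obtain ⟨m, rfl⟩ : ∃ m, c = m + 1 := ⟨c - 1, by omega⟩
      rw [List.foldl_append, List.replicate_succ, List.foldl_cons]
      have hstep : pvG (none, 0, b) w = (some w, 1, pvUpd b (1, (w.length : Int))) := by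
        simp [pvG, pvUpd]
      rw [hstep, pv_run w m]
      have hbest :
          (if m = 0 then pvUpd b (1, (w.length : Int))
           else pvUpd (pvUpd b (1, (w.length : Int))) (1 + (m : Int), (w.length : Int)))
            = pvUpd b (((m + 1 : Nat) : Int), (w.length : Int)) := by
        rcases Nat.eq_zero_or_pos m with h0 | hpos
        · subst h0; norm_num
        · have hne0 : m ≠ 0 := by omega
          rw [if_neg hne0, pvUpd_absorb b 1 (1 + (m : Int)) _ (by omega)]
          have hc1 : (1 : Int) + (m : Int) = ((m + 1 : Nat) : Int) := by push_cast; ring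
          rw [hc1]
      rw [hbest, pv_reset w _ _ rest hwr,
        ih rest hrlen hrs (pvUpd b (((m + 1 : Nat) : Int), (w.length : Int)))]
      -- RHS
      rw [← List.replicate_succ]
      rw [pv_set_cons w (m + 1) rest (by omega) hwr, List.map_cons, List.foldl_cons]
      have hcw : (List.replicate (m + 1) w ++ rest).count w = m + 1 := by
        rw [List.count_append, List.count_replicate]
        simp [List.count_eq_zero.mpr hwr]
      rw [hcw]
      congr 1
      apply List.map_congr_left
      intro x hx
      have hxr : x ∈ rest := (PySem.Set.mem_ofList rest x).mp hx
      have hxw : x ≠ w := fun h => hwr (h ▸ hxr)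
      rw [List.count_append, List.count_replicate, if_neg (by simpa using Ne.symm hxw)]
      simp

-- ===== VERDICT (by name: the statement is the Claim_ definition above) =====
theorem find_highest_frequency_word_length_spec : Claim_equal_find_highest_frequency_word_length := by
  intro s _
  unfold Spec_find_highest_frequency_word_length find_highest_frequency_word_length find_highest_frequency_word_length_alt
  simp only []
  rw [pv_freq_eq, PySem.Dict.foldl_insert_getD_add_one_eq_counter]
  set words := PySem.Chars.split₀ (PySem.Chars.lower (s.toList.filter (fun c => PySem.Chars.isalnum c || PySem.Chars.isspace c))) with hwords
  set d := PySem.Dict.counter words with hd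
  have hnd : d.keys.Nodup := PySem.Dict.nodup_keys_counter words
  -- A's scans over keys become scans over items, then the fused lexicographic fold
  rw [pv_keys_fold d hnd (fun m _ c => if c > m then c else m) 0]
  rw [pv_keys_fold d hnd
      (fun m w c => if c == d.items.foldl (fun m p => if p.2 > m then p.2 else m) 0 && (w.length : Int) > m
        then (w.length : Int) else m) 0]
  have hA :
      d.items.foldl (fun m p => if p.2 == pvRunMax d.items && (p.1.length : Int) > m then (p.1.length : Int) else m) 0
        = (d.items.foldl (fun p wc => pvUpd p (wc.2, (wc.1.length : Int))) ((0 : Int), (0 : Int))).2 := by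
    rw [← pv_fused_eq_upd, pv_pairfold]
  rw [show d.items.foldl (fun m p => if p.2 > m then p.2 else m) (0 : Int) = pvRunMax d.items from rfl] at *
  rw [hA]
  -- B's side: the run scan over the sorted words
  set ls := @PySem.List.sorted (List Char) (List Char) List.instLinearOrder.toLT LinearOrder.toDecidableLT words (fun x => x) false with hls
  have hBG :
      (List.foldl
        (fun (st : Option (List Char) × Int × (Int × Int)) w =>
          let run : Int := if st.1 == some w then st.2.1 + 1 else 1
          let cand : Int × Int := (run, (w.length : Int))
          (some w, run,
            if st.2.2.1 < cand.1 ∨ (st.2.2.1 = cand.1 ∧ st.2.2.2 < cand.2) then cand else st.2.2))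
        (none, 0, ((0 : Int), (0 : Int))) ls)
      = List.foldl pvG (none, 0, ((0 : Int), (0 : Int))) ls := rfl
  rw [hBG]
  have hperm : ls.Perm words :=
    @PySem.List.sorted_perm (List Char) (List Char) List.instLinearOrder.toLT LinearOrder.toDecidableLT
      words (fun x => x) false
  have hsorted : ls.Pairwise (· ≤ ·) := PySem.List.sorted_pairwise (κ := List Char) words (fun x => x)
  rw [pv_scan ls.length ls le_rfl hsorted ((0 : Int), (0 : Int))]
  -- both sides are pvUpd folds over the distinct (count, length) pairs; they agree up to permutation
  have hcnt : ∀ x, ls.count x = words.count x := fun x => hperm.count_eq x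
  have hmapeq :
      (PySem.Set.ofList ls).map (fun w => ((ls.count w : Int), (w.length : Int)))
        = (PySem.Set.ofList ls).map (fun w => ((words.count w : Int), (w.length : Int))) := by
    apply List.map_congr_left; intro x _; rw [hcnt]
  have hsperm : (PySem.Set.ofList ls).Perm (PySem.Set.ofList words) :=
    (List.perm_ext_iff_of_nodup (PySem.Set.nodup_ofList ls) (PySem.Set.nodup_ofList words)).mpr
      (fun a => by rw [PySem.Set.mem_ofList, PySem.Set.mem_ofList, hperm.mem_iff])
  have hitems : d.items = (PySem.Set.ofList words).map (fun k => (k, (words.count k : Int))) := by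
    rw [hd]; exact PySem.Dict.items_counter words
  rw [hitems]
  have hfold :
      List.foldl (fun p wc => pvUpd p (wc.2, (wc.1.length : Int))) ((0 : Int), (0 : Int))
          ((PySem.Set.ofList words).map (fun k => (k, (words.count k : Int))))
        = List.foldl pvUpd ((0 : Int), (0 : Int))
            ((PySem.Set.ofList words).map (fun k => ((words.count k : Int), (k.length : Int)))) := by
    simp only [List.foldl_map]
  rw [hfold, hmapeq]
  congr 1
  exact ((hsperm.map (fun w => ((words.count w : Int), (w.length : Int)))).foldl_eq'
    (fun x _ y _ z => pvUpd_comm z x y) _).symm
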